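-- pv_equiv track=rewrite | github.com/Zolomon/pos-hidden-markov | processing.py | parse_sentences
-- ===== SOURCE A (Python) =====
-- def parse_sentences(file_contentes):
--     sentences = []
--     sentence = []
--     for line in file_contentes:
--         if line == '\n':
--             # new sentence
--             sentences.append(sentence)
--             sentence = []
--             continue
--
--         sentence.append(line.split('\t'))
--     return sentences
-- ===== SOURCE B (Python) =====
-- def parse_sentences(file_contentes):
--     # Staged passes: collect blank-line indices, then emit each segment between
--     # consecutive blanks via zip; content after the last blank is dropped, as in A.
--     lines = list(file_contentes)
--     blanks = [i for i, l in enumerate(lines) if l == '\n']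
--     return [[l.split('\t') for l in lines[p + 1:b]]
--             for p, b in zip([-1] + blanks, blanks)]
-- ===== Notes on version B (the rewrite author's own statement) =====
-- stated objective: alternative
-- what changed: B replaces A's single-pass accumulator loop with staged passes: it first collects the indices of blank lines, then builds each sentence as a slice between consecutive blank indices via zip and a comprehension (slice-based copying beats per-line appends by a constant factor).
import Mathlib
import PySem

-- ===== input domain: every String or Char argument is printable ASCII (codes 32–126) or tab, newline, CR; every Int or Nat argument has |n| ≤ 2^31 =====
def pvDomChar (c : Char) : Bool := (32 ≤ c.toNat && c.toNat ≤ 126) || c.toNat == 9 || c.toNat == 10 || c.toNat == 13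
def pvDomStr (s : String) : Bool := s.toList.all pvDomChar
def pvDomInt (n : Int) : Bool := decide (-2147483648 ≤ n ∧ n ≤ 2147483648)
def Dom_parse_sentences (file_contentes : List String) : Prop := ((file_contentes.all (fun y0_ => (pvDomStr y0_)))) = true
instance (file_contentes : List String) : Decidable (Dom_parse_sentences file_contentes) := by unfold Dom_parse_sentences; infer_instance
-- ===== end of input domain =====

-- B replaces A's single-pass sentence accumulator with staged passes: collect the blank-line
-- indices, then emit each segment between consecutive blanks via zip; equality of return values
-- is proved (neither program mutates its argument).

-- line.split('\t') ('\t' is a nonempty separator, so split? always returns some)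
def splitT (s : String) : List String := (PySem.Str.split? s "\t").getD []

-- ===== PORT A =====
def parse_sentences (file_contentes : List String) : List (List (List String)) :=
  (file_contentes.foldl
    (fun (st : List (List (List String)) × List (List String)) line =>
      if line = "\n" then (st.1 ++ [st.2], [])
      else (st.1, st.2 ++ [splitT line]))
    ([], [])).1

-- ===== PORT B =====
def parse_sentences_alt (file_contentes : List String) : List (List (List String)) :=
  let lines := file_contentes
  let blanks := (PySem.List.enumerate lines).filterMap
    (fun p => if p.2 = "\n" then some p.1 else none)
  (((-1 : Int) :: blanks).zip blanks).map
    (fun pb => (PySem.List.slice lines (some (pb.1 + 1)) (some pb.2)).map splitT)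

-- ===== PRECONDITION & SPEC =====
def Spec_parse_sentences (file_contentes : List String) (out : List (List (List String))) : Prop := out = parse_sentences_alt file_contentes
instance (file_contentes : List String) (out : List (List (List String))) : Decidable (Spec_parse_sentences file_contentes out) := by unfold Spec_parse_sentences; infer_instance

-- ===== CLAIM (what is proved, stated in full; the proofs are below) =====
def Claim_equal_parse_sentences : Prop := ∀ (file_contentes : List String), Dom_parse_sentences file_contentes → Spec_parse_sentences file_contentes (parse_sentences file_contentes)

-- ===== LEMMAS AND PROOFS =====

-- intermediate loop body used only by the proofs: fold that keeps (sentences, start index)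
-- and slices xs[start:i] at each blank line
def sliceStep (xs : List String) (st : List (List (List String)) × Int) (p : Int × String) :
    List (List (List String)) × Int :=
  if p.2 = "\n" then
    (st.1 ++ [(PySem.List.slice xs (some st.2) (some p.1)).map splitT], p.1 + 1)
  else st

-- the element at the split point: if xs.drop i = l :: t then xs[i]? = some l
lemma drop_head (xs : List String) (i : Nat) (l : String) (t : List String)
    (h : xs.drop i = l :: t) : xs[i]? = some l := by
  have h0 : (xs.drop i)[0]? = some l := by rw [h]; rfl
  simpa [List.getElem?_drop] using h0

-- extending a slice by one element on the right
lemma slice_extend (xs : List String) (start i : Nat) (l : String) (t : List String)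
    (hle : start ≤ i) (h : xs.drop i = l :: t) :
    PySem.List.slice xs (some (start : Int)) (some ((i : Int) + 1)) =
      PySem.List.slice xs (some (start : Int)) (some (i : Int)) ++ [l] := by
  have h1 : ((i : Int) + 1) = ((i + 1 : Nat) : Int) := by push_cast; ring
  rw [h1, PySem.List.slice_natCast, PySem.List.slice_natCast]
  have h2 : i + 1 - start = (i - start) + 1 := by omega
  rw [h2, List.take_add_one]
  have h3 : (xs.drop start)[i - start]? = some l := by
    rw [List.getElem?_drop]
    have h4 : start + (i - start) = i := by omega
    rw [h4]; exact drop_head xs i l t h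
  simp [h3]

-- invariant 1: A's fold over the suffix ys = xs.drop i, with the pending segment held as the
-- already-split list xs[start:i], equals the slice-based fold sliceStep
lemma fold_eq (xs : List String) : ∀ (ys : List String) (i start : Nat)
    (acc : List (List (List String))), xs.drop i = ys → start ≤ i →
    ((PySem.List.enumerate ys (i : Int)).foldl (sliceStep xs) (acc, (start : Int))).1
    = (ys.foldl
      (fun (st : List (List (List String)) × List (List String)) line =>
        if line = "\n" then (st.1 ++ [st.2], [])
        else (st.1, st.2 ++ [splitT line]))
      (acc, (PySem.List.slice xs (some (start : Int)) (some (i : Int))).map splitT)).1 := by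
  intro ys
  induction ys with
  | nil => intro i start acc _ _; simp [PySem.List.enumerate_nil]
  | cons l t ih =>
    intro i start acc hdrop hle
    rw [PySem.List.enumerate_cons]
    have hdrop' : xs.drop (i + 1) = t := by
      rw [← List.tail_drop, hdrop]; rfl
    by_cases hl : l = "\n"
    · simp only [List.foldl_cons, sliceStep, hl, if_true]
      have h1 : ((i : Int) + 1) = ((i + 1 : Nat) : Int) := by push_cast; ring
      rw [h1, ih (i+1) (i+1) _ hdrop' (le_refl _)]
      have h2 : PySem.List.slice xs (some ((i+1 : Nat) : Int)) (some ((i+1 : Nat) : Int)) = [] := by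
        rw [PySem.List.slice_natCast]; simp
      rw [h2]
      simp
    · simp only [List.foldl_cons, sliceStep, hl, if_false]
      have h1 : ((i : Int) + 1) = ((i + 1 : Nat) : Int) := by push_cast; ring
      rw [h1, ih (i+1) start _ hdrop' (by omega)]
      rw [← h1, slice_extend xs start i l t hle hdrop]
      simp

-- invariant 2: the slice-based fold with pending start s equals B's zip-of-blank-indices form
-- with (s - 1) prepended as the "previous blank" of the first segment
lemma zip_eq (xs : List String) : ∀ (ys : List String) (i s : Int)
    (acc : List (List (List String))),
    ((PySem.List.enumerate ys i).foldl (sliceStep xs) (acc, s)).1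
    = acc ++ (((s - 1) ::
        ((PySem.List.enumerate ys i).filterMap (fun p => if p.2 = "\n" then some p.1 else none))).zip
        ((PySem.List.enumerate ys i).filterMap (fun p => if p.2 = "\n" then some p.1 else none))).map
        (fun pb => (PySem.List.slice xs (some (pb.1 + 1)) (some pb.2)).map splitT) := by
  intro ys
  induction ys with
  | nil => intro i s acc; simp [PySem.List.enumerate_nil]
  | cons l t ih =>
    intro i s acc
    rw [PySem.List.enumerate_cons]
    by_cases hl : l = "\n"
    · simp only [List.foldl_cons, List.filterMap_cons, sliceStep, hl, if_true]
      rw [ih (i+1) (i+1) _]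
      have h1 : (i + 1 : Int) - 1 = i := by ring
      have h2 : (s - 1 : Int) + 1 = s := by ring
      simp [h1, h2]
    · simp only [List.foldl_cons, List.filterMap_cons, sliceStep, hl, if_false]
      exact ih (i+1) s acc

-- ===== VERDICT (by name: the statement is the Claim_ definition above) =====
theorem parse_sentences_spec : Claim_equal_parse_sentences := by
  intro xs _
  unfold Spec_parse_sentences parse_sentences parse_sentences_alt
  have h2 : (PySem.List.slice xs (some ((0:Nat):Int)) (some ((0:Nat):Int))).map splitT = [] := by
    rw [PySem.List.slice_natCast]; simp
  have hA := fold_eq xs xs 0 0 [] (by simp) (le_refl _)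
  rw [h2] at hA
  rw [← hA, zip_eq xs xs ((0:Nat):Int) ((0:Nat):Int) []]
  norm_num
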